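-- pv_equiv track=rewrite | github.com/infiniflow/ragflow | agent/tools/code_exec_contract.py | _normalize_expected_type
-- ===== SOURCE A (Python) =====
-- class ContractError(ValueError):
--     pass
--
-- def _normalize_expected_type(expected_type: str) -> str:
--     etype = expected_type.strip()
--     low = etype.lower()
--     simple_types = {
--         "string": "String",
--         "number": "Number",
--         "boolean": "Boolean",
--         "object": "Object",
--         "null": "Null",
--         "any": "Any",
--     }
--     if low in simple_types:
--         return simple_types[low]
--     if low.startswith("array<") and low.endswith(">"):
--         inner = etype[etype.find("<") + 1 : -1].strip()
--         if not inner: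
--             raise ContractError(f"Unsupported expected type: {expected_type}")
--         return f"Array<{_normalize_expected_type(inner)}>"
--     return etype
-- ===== SOURCE B (Python) =====
-- class ContractError(ValueError):
--     pass
--
-- _SIMPLE_TYPES = {
--     "string": "String",
--     "number": "Number",
--     "boolean": "Boolean",
--     "object": "Object",
--     "null": "Null",
--     "any": "Any",
-- }
--
-- def _normalize_expected_type(expected_type: str) -> str:
--     # Iterative: peel array wrapper layers counting depth (no dict check inside
--     # the loop -- no simple-type name starts with the wrapper prefix, and the
--     # opening bracket is always at index 5 of the stripped string, so s[6:-1] is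
--     # the inner part), then map the core once and rebuild by string repetition.
--     s = expected_type.strip()
--     depth = 0
--     low = s.lower()
--     while low.startswith("array<") and low.endswith(">"):
--         s = s[6:-1].strip()
--         if not s:
--             raise ContractError(f"Unsupported expected type: {expected_type}")
--         depth += 1
--         low = s.lower()
--     core = _SIMPLE_TYPES.get(low, s)
--     return "Array<" * depth + core + ">" * depth
-- ===== Notes on version B (the rewrite author's own statement) =====
-- stated objective: alternative
-- what changed: Replaces A's recursion with an iterative two-stage pass: a peel loop that matches only the array wrapper pattern (slicing at the fixed index 6 instead of searching for the opening bracket) while counting depth, then a single dict lookup for the core and a rebuild by repeating the wrapper depth times.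
import Mathlib
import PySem

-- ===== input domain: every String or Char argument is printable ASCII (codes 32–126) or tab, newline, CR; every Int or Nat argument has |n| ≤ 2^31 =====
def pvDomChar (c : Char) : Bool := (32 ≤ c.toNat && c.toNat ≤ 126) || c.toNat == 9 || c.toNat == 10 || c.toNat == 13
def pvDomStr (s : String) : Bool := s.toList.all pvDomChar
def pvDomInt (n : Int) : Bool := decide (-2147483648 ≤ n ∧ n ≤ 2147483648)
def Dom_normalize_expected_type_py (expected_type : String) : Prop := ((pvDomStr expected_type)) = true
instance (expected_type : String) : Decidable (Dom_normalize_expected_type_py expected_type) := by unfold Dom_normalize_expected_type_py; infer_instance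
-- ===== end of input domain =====

-- B replaces A's recursion with an iterative two-stage pass: a peel loop that only matches
-- the array wrapper pattern (slice at the fixed index 6) while counting depth, then one dict
-- lookup for the core and a rebuild by string repetition (objective: alternative, same cost).

-- the simple_types dict, shared literal of both Pythons
def pvSimpleTypes : PySem.Dict String String :=
  PySem.Dict.ofList [("string", "String"), ("number", "Number"), ("boolean", "Boolean"),
                     ("object", "Object"), ("null", "Null"), ("any", "Any")]

-- ===== PORT A =====
-- A's recursion, fuel = |expected_type| + 1 (each recursive argument is at least 2 chars
-- shorter, so the fuel never runs out); 'none' models the ContractError raise (outside Pre_).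
def normAgo : Nat → String → Option String
  | 0, _ => none
  | Nat.succ f, expected_type =>
    let etype := PySem.Str.strip expected_type
    let low := PySem.Str.lower etype
    match pvSimpleTypes.get? low with
    | some v => some v
    | none =>
      if PySem.Str.startswith low "array<" && PySem.Str.endswith low ">" then
        let inner := PySem.Str.strip
          (PySem.Str.slice etype (some (PySem.Str.find etype "<" + 1)) (some (-1)))
        if inner = "" then none
        else (normAgo f inner).map (fun r => "Array<" ++ r ++ ">")
      else some etype

def normalize_expected_type_py (expected_type : String) : String :=
  (normAgo (expected_type.toList.length + 1) expected_type).getD ""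

-- ===== PORT B =====
-- Python's  x * n  string repetition (hand-ported: n copies of x concatenated; exact)
def pvRep (x : String) : Nat → String
  | 0 => ""
  | Nat.succ n => x ++ pvRep x n

-- B's while-loop: only the array wrapper pattern is tested (no dict probe per layer), the slice
-- is at the fixed index 6; state = (current stripped string, depth); 'none' models the
-- ContractError raise (outside Pre_); fuel as in A's port.
def pvPeel : Nat → String → Nat → Option (String × Nat)
  | 0, _, _ => none
  | Nat.succ f, s, depth =>
    let low := PySem.Str.lower s
    if PySem.Str.startswith low "array<" && PySem.Str.endswith low ">" then
      let s' := PySem.Str.strip (PySem.Str.slice s (some 6) (some (-1)))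
      if s' = "" then none else pvPeel f s' (depth + 1)
    else some (s, depth)

def normalize_expected_type_py_alt (expected_type : String) : String :=
  match pvPeel (expected_type.toList.length + 1) (PySem.Str.strip expected_type) 0 with
  | none => ""
  | some (s, depth) =>
    pvRep "Array<" depth ++ (pvSimpleTypes.get? (PySem.Str.lower s)).getD s ++ pvRep ">" depth

-- ===== PRECONDITION & SPEC =====
-- Pre_ excludes exactly the inputs on which A raises ContractError (an empty stripped inner at
-- some nesting level of the array wrapper>); B raises there too. pvBad is the grammar of those strings:
-- it peels one wrapper layer per step, each layer is at least 2 chars shorter than the last,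
-- so |l| + 1 peeling steps always suffice.
def pvBad : Nat → List Char → Bool
  | 0, _ => false
  | Nat.succ k, l =>
    let t := PySem.Chars.strip l
    let low := PySem.Chars.lower t
    if (pvSimpleTypes.get? (String.ofList low)).isSome then false
    else if PySem.Chars.startswith low "array<".toList
            && PySem.Chars.endswith low ">".toList then
      let inner := PySem.Chars.strip
        (PySem.Chars.slice t (some (PySem.Chars.find t "<".toList + 1)) (some (-1)))
      if inner = [] then true else pvBad k inner
    else false

def Pre_normalize_expected_type_py (expected_type : String) : Prop :=
  pvBad (expected_type.toList.length + 1) expected_type.toList = false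
instance (expected_type : String) : Decidable (Pre_normalize_expected_type_py expected_type) := by
  unfold Pre_normalize_expected_type_py; infer_instance

def pvWitness_normalize_expected_type_py : String := "array<string>"

def Spec_normalize_expected_type_py (expected_type : String) (out : String) : Prop :=
  out = normalize_expected_type_py_alt expected_type
instance (expected_type : String) (out : String) : Decidable (Spec_normalize_expected_type_py expected_type out) := by
  unfold Spec_normalize_expected_type_py; infer_instance

-- ===== CLAIM (what is proved, stated in full; the proofs are below) =====
def Claim_equal_normalize_expected_type_py : Prop := ∀ (expected_type : String), Dom_normalize_expected_type_py expected_type → Pre_normalize_expected_type_py expected_type → Spec_normalize_expected_type_py expected_type (normalize_expected_type_py expected_type)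

-- ===== LEMMAS AND PROOFS =====

theorem pvToNat_ofNat (n : Nat) (hv : n.isValidChar) : (Char.ofNat n).toNat = n := by
  simp [Char.ofNat, hv, Char.ofNatAux, Char.toNat]

-- lowering a character yields '<' only for '<' itself
theorem pvLowerChar_lt {c : Char} (h : PySem.Chars.lowerChar c = '<') : c = '<' := by
  unfold PySem.Chars.lowerChar at h
  split at h
  · next hu =>
    unfold PySem.Chars.isupper at hu
    simp only [Bool.and_eq_true, decide_eq_true_eq] at hu
    exfalso
    have h1 : (65:Nat) ≤ c.toNat := by
      have := UInt32.le_iff_toNat_le.mp (Char.le_def.mp hu.1)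
      simpa using this
    have h2 : c.toNat ≤ 90 := by
      have := UInt32.le_iff_toNat_le.mp (Char.le_def.mp hu.2)
      simpa using this
    have hv : (c.toNat + 32).isValidChar := Or.inl (by omega)
    have hc := congrArg Char.toNat h
    rw [pvToNat_ofNat _ hv] at hc
    rw [show ('<').toNat = 60 from rfl] at hc
    omega
  · exact h

-- when the lowered string starts with the 6-char wrapper prefix, the opening bracket of the string is at index 5
theorem pvFind_lt_eq_five (l : List Char)
    (h : PySem.Chars.startswith (PySem.Chars.lower l) "array<".toList = true) :
    PySem.Chars.find l "<".toList = 5 := by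
  rw [PySem.Chars.startswith_iff] at h
  rw [show PySem.Chars.lower l = l.map PySem.Chars.lowerChar from rfl] at h
  have hlen : 6 ≤ l.length := by
    have := h.length_le
    simpa using this
  have hi : ∀ (i : Nat) (hi6 : i < 6),
      ("array<".toList)[i]'(by simpa using hi6) = PySem.Chars.lowerChar (l[i]'(by omega)) := by
    intro i hi6
    have := h.getElem (i := i) (by simpa using hi6)
    simpa using this
  have hc5 : l[5]'(by omega) = '<' := pvLowerChar_lt (hi 5 (by omega)).symm
  have hdrop5 : "<".toList <+: l.drop 5 := by
    rw [List.drop_eq_getElem_cons (by omega : 5 < l.length), hc5]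
    exact List.cons_prefix_cons.mpr ⟨rfl, List.nil_prefix⟩
  have hinf : "<".toList <:+: l :=
    (PySem.Chars.isIn_iff_infix _ _).mp
      ((PySem.Chars.exists_prefix_drop_iff_isIn _ _).mp ⟨5, hdrop5⟩)
  have hne : PySem.Chars.find l "<".toList ≠ -1 := fun he =>
    ((PySem.Chars.find_eq_neg_one_iff _ _).mp he) hinf
  have hnn : 0 ≤ PySem.Chars.find l "<".toList := by
    have := PySem.Chars.neg_one_le_find l "<".toList
    omega
  obtain ⟨hp, hmin⟩ := PySem.Chars.find_spec hnn
  have hj5 : (PySem.Chars.find l "<".toList).toNat = 5 := by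
    by_contra hne5
    rcases Nat.lt_or_ge (PySem.Chars.find l "<".toList).toNat 5 with hlt | hge
    · have hjl : (PySem.Chars.find l "<".toList).toNat < l.length := by omega
      rw [List.drop_eq_getElem_cons hjl] at hp
      have hp' : ['<'] <+: l[(PySem.Chars.find l "<".toList).toNat]'hjl
          :: List.drop ((PySem.Chars.find l "<".toList).toNat + 1) l := hp
      have h1 : '<' = l[(PySem.Chars.find l "<".toList).toNat]'hjl :=
        (List.cons_prefix_cons.mp hp').1
      have h2 := hi (PySem.Chars.find l "<".toList).toNat (by omega)
      rw [← h1] at h2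
      have hlt6 : (PySem.Chars.find l "<".toList).toNat < ("array<".toList).length := by
        rw [show ("array<".toList).length = 6 from rfl]
        omega
      have h3 : ("array<".toList)[(PySem.Chars.find l "<".toList).toNat]?
          = some (PySem.Chars.lowerChar '<') := by
        rw [List.getElem?_eq_getElem hlt6, h2]
      clear hp hp' h1 h2 hjl hmin hne5 hne hnn hinf hdrop5 hc5 hi h hlen hlt6
      generalize hgen : (PySem.Chars.find l "<".toList).toNat = n at hlt h3
      interval_cases n <;> exact absurd h3 (by decide)
    · exact hmin 5 (by omega) hdrop5
  omega

-- no key of simple_types starts with the wrapper prefix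
theorem pvDict_not_array (low : String) (v : String)
    (h : pvSimpleTypes.get? low = some v) :
    PySem.Str.startswith low "array<" = false := by
  rw [show pvSimpleTypes = PySem.Dict.mk [("string", "String"), ("number", "Number"),
        ("boolean", "Boolean"), ("object", "Object"), ("null", "Null"), ("any", "Any")] from rfl] at h
  simp only [PySem.Dict.get?_mk_cons] at h
  split_ifs at h with h1 h2 h3 h4 h5 h6
  · rw [show low = "string" from (beq_iff_eq.mp h1).symm]; decide
  · rw [show low = "number" from (beq_iff_eq.mp h2).symm]; decide
  · rw [show low = "boolean" from (beq_iff_eq.mp h3).symm]; decide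
  · rw [show low = "object" from (beq_iff_eq.mp h4).symm]; decide
  · rw [show low = "null" from (beq_iff_eq.mp h5).symm]; decide
  · rw [show low = "any" from (beq_iff_eq.mp h6).symm]; decide
  · simp [PySem.Dict.get?] at h

-- repetition grows on the right as well
theorem pvRep_succ' (x : String) (n : Nat) : pvRep x (n + 1) = pvRep x n ++ x := by
  induction n with
  | zero => simp [pvRep]
  | succ n ih =>
    show x ++ pvRep x (n + 1) = (x ++ pvRep x n) ++ x
    rw [ih, String.append_assoc]

-- strip is idempotent (Chars level)
theorem pvChars_strip_idem (l : List Char) :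
    PySem.Chars.strip (PySem.Chars.strip l) = PySem.Chars.strip l := by
  unfold PySem.Chars.strip PySem.Chars.rstrip PySem.Chars.lstrip
  set p := PySem.Chars.isspace
  set m := List.dropWhile p l with hm
  have hhead : ∀ hl : 0 < m.length, ¬ p m[0] = true :=
    List.dropWhile_eq_self_iff.mp (by rw [hm]; exact List.dropWhile_idempotent p l)
  set r := (List.dropWhile p m.reverse).reverse with hr
  have hpre : r <+: m := by
    rw [hr]
    have := List.reverse_prefix.mpr (List.dropWhile_suffix (l := m.reverse) p)
    simpa using this
  have h1 : List.dropWhile p r = r := by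
    rw [List.dropWhile_eq_self_iff]
    intro hl
    rw [hpre.getElem hl]
    exact hhead (lt_of_lt_of_le hl hpre.length_le)
  rw [h1]
  have hhead2 : ∀ hl : 0 < r.reverse.length, ¬ p r.reverse[0] = true := by
    rw [hr]
    simp only [List.reverse_reverse]
    exact List.dropWhile_eq_self_iff.mp (List.dropWhile_idempotent p m.reverse)
  have h2 : List.dropWhile p r.reverse = r.reverse := List.dropWhile_eq_self_iff.mpr hhead2
  rw [h2, List.reverse_reverse]

-- strip is idempotent (String level)
theorem pvStrip_idem (s : String) :
    PySem.Str.strip (PySem.Str.strip s) = PySem.Str.strip s := by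
  unfold PySem.Str.strip
  rw [show (String.ofList (PySem.Chars.strip s.toList)).toList = PySem.Chars.strip s.toList by simp,
      pvChars_strip_idem]

-- the peel loop with depth counter agrees with A's recursion wrapped d extra times
theorem pvPeel_agree (f : Nat) : ∀ (s : String) (d : Nat), PySem.Str.strip s = s →
    (normAgo f s).map (fun r => pvRep "Array<" d ++ r ++ pvRep ">" d)
      = (pvPeel f s d).map
          (fun p => pvRep "Array<" p.2 ++ (pvSimpleTypes.get? (PySem.Str.lower p.1)).getD p.1
                      ++ pvRep ">" p.2) := by
  induction f with
  | zero => intro s d _; rfl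
  | succ f ih =>
    intro s d hs
    simp only [normAgo, pvPeel, hs]
    cases hd : pvSimpleTypes.get? (PySem.Str.lower s) with
    | some v =>
      have hns := pvDict_not_array _ _ hd
      rw [hns, Bool.false_and, if_neg (by decide), if_neg (by decide)]
      simp [hd]
    | none =>
      by_cases hb : (PySem.Str.startswith (PySem.Str.lower s) "array<"
                      && PySem.Str.endswith (PySem.Str.lower s) ">") = true
      · have hsw : PySem.Chars.startswith (PySem.Chars.lower s.toList) "array<".toList = true := by
          have := ((Bool.and_eq_true _ _).mp hb).1
          rw [PySem.Str.startswith_eq, PySem.Str.toList_lower] at this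
          exact this
        have hfind : PySem.Str.find s "<" = 5 := by
          rw [PySem.Str.find_eq]
          exact pvFind_lt_eq_five s.toList hsw
        rw [if_pos hb, if_pos hb, hfind, show (5:Int) + 1 = 6 from rfl]
        by_cases hinner : PySem.Str.strip (PySem.Str.slice s (some 6) (some (-1))) = ""
        · rw [if_pos hinner, if_pos hinner]; rfl
        · rw [if_neg hinner, if_neg hinner,
              ← ih _ (d + 1) (pvStrip_idem _), Option.map_map]
          congr 1
          funext r
          simp only [Function.comp_apply]
          rw [pvRep_succ' "Array<" d]
          show pvRep "Array<" d ++ ("Array<" ++ r ++ ">") ++ pvRep ">" d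
            = (pvRep "Array<" d ++ "Array<") ++ r ++ (">" ++ pvRep ">" d)
          simp [String.append_assoc]
      · rw [if_neg hb, if_neg hb]
        simp [hd]

-- A's first step only sees the stripped argument
theorem pvNormA_strip (f : Nat) (s : String) :
    normAgo (f + 1) s = normAgo (f + 1) (PySem.Str.strip s) := by
  simp only [normAgo, pvStrip_idem]

-- ===== VERDICT (by name: the statement is the Claim_ definition above) =====
theorem normalize_expected_type_py_spec : Claim_equal_normalize_expected_type_py := by
  unfold Claim_equal_normalize_expected_type_py
  intro e _ _
  unfold Spec_normalize_expected_type_py normalize_expected_type_py normalize_expected_type_py_alt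
  have h := pvPeel_agree (e.toList.length + 1) (PySem.Str.strip e) 0 (pvStrip_idem e)
  rw [← pvNormA_strip] at h
  cases hb : pvPeel (e.toList.length + 1) (PySem.Str.strip e) 0 with
  | none =>
    rw [hb] at h
    cases ha : normAgo (e.toList.length + 1) e with
    | none => rfl
    | some r => rw [ha] at h; exact absurd h (by simp)
  | some p =>
    rw [hb] at h
    cases ha : normAgo (e.toList.length + 1) e with
    | none => rw [ha] at h; exact absurd h (by simp)
    | some r =>
      rw [ha] at h
      obtain ⟨c, dep⟩ := p
      simp only [Option.map_some, Option.some.injEq] at h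
      simpa [pvRep] using h
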